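-- pv_equiv track=rewrite | github.com/SanliData/soar_trial | backend/src/knowledge_ingestion/semantic_chunk_service.py | summarize_chunk_structure
-- ===== SOURCE A (Python) =====
-- def summarize_chunk_structure(chunks: list[str]) -> dict[str, object]:
--     """Structural summary only — no content generation."""
--     lengths = [len(c) for c in chunks]
--     return {
--         "chunk_count": len(chunks),
--         "total_chars": sum(lengths),
--         "min_chunk_chars": min(lengths) if lengths else 0,
--         "max_chunk_chars": max(lengths) if lengths else 0,
--     }
-- ===== SOURCE B (Python) =====
-- def summarize_chunk_structure(chunks: list[str]) -> dict[str, object]: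
--     """Structural summary only — no content generation."""
--     s = sorted(len(c) for c in chunks)
--     if not s:
--         return {
--             "chunk_count": 0,
--             "total_chars": 0,
--             "min_chunk_chars": 0,
--             "max_chunk_chars": 0,
--         }
--     return {
--         "chunk_count": len(chunks),
--         "total_chars": sum(s),
--         "min_chunk_chars": s[0],
--         "max_chunk_chars": s[-1],
--     }
-- ===== Notes on version B (the rewrite author's own statement) =====
-- stated objective: alternative
-- what changed: B sorts the lengths once and reads the minimum and maximum off the two ends of the sorted list (sort-then-endpoints), instead of A's separate min()/max() scans over a precomputed lengths list.
import Mathlib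
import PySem

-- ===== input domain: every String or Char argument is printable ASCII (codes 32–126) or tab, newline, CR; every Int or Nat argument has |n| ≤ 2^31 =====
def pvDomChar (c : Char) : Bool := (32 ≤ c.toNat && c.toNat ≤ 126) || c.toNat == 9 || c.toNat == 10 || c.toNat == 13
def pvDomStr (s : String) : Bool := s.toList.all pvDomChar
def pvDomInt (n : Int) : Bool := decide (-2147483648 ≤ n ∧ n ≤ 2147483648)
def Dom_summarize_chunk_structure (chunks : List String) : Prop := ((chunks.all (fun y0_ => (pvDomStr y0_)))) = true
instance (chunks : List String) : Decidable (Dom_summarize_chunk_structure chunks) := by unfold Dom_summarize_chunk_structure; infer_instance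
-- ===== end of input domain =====

-- B sorts the lengths once and reads min/max off the ends of the sorted list
-- (sort-then-endpoints) instead of A's separate min()/max() scans over a lengths list.


-- ===== PORT A =====
def summarize_chunk_structure (chunks : List String) : List (String × Int) :=
  let lengths : List Int := chunks.map (fun c => PySem.Str.len c)
  [("chunk_count", (chunks.length : Int)),
   ("total_chars", lengths.foldl (· + ·) 0),
   ("min_chunk_chars", if lengths = [] then 0 else (PySem.List.min? lengths (fun x => x)).getD 0),
   ("max_chunk_chars", if lengths = [] then 0 else (PySem.List.max? lengths (fun x => x)).getD 0)]

-- ===== PORT B =====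
-- Source B: s = sorted(len(c) for c in chunks); empty guard; then len/sum/s[0]/s[-1]
def summarize_chunk_structure_alt (chunks : List String) : List (String × Int) :=
  let s := PySem.List.sorted (chunks.map (fun c => PySem.Str.len c)) (fun x => x) false
  match s with
  | [] =>
    [("chunk_count", 0), ("total_chars", 0),
     ("min_chunk_chars", 0), ("max_chunk_chars", 0)]
  | x :: t =>
    [("chunk_count", (chunks.length : Int)),
     ("total_chars", (x :: t).sum),
     ("min_chunk_chars", x),
     ("max_chunk_chars", (x :: t).getLast (by simp))]

-- ===== PRECONDITION & SPEC =====
def Spec_summarize_chunk_structure (chunks : List String) (out : List (String × Int)) : Prop := out = summarize_chunk_structure_alt chunks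
instance (chunks : List String) (out : List (String × Int)) : Decidable (Spec_summarize_chunk_structure chunks out) := by unfold Spec_summarize_chunk_structure; infer_instance

-- ===== CLAIM (what is proved, stated in full; the proofs are below) =====
def Claim_equal_summarize_chunk_structure : Prop := ∀ (chunks : List String), Dom_summarize_chunk_structure chunks → Spec_summarize_chunk_structure chunks (summarize_chunk_structure chunks)

-- ===== LEMMAS AND PROOFS =====

-- the last element of a sorted list is an upper bound of it
theorem pv_getLast_sorted_ge (L : List Int) (x : Int) (t : List Int)
    (h : PySem.List.sorted L (fun y => y) false = x :: t) :
    ∀ y ∈ L, y ≤ (x :: t).getLast (by simp) := by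
  intro y hy
  have hys : y ∈ x :: t := h ▸ ((PySem.List.mem_sorted L (fun y => y) false y).mpr hy)
  obtain ⟨j, hj, hyj⟩ := List.mem_iff_getElem.mp hys
  have hq : (x :: t).length - 1 < (PySem.List.sorted L (fun y => y) false).length := by
    rw [h]; simp
  have hmono := PySem.List.sorted_id_getElem_mono L
      (p := j) (q := (x :: t).length - 1) (by simp at hj ⊢; omega) hq
  simp only [h] at hmono
  rw [List.getLast_eq_getElem]
  exact hyj ▸ hmono

-- ===== VERDICT (by name: the statement is the Claim_ definition above) =====
theorem summarize_chunk_structure_spec : Claim_equal_summarize_chunk_structure := by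
  intro chunks _
  unfold Spec_summarize_chunk_structure summarize_chunk_structure summarize_chunk_structure_alt
  cases hchunks : chunks with
  | nil => decide
  | cons c cs =>
    set L : List Int := (c :: cs).map (fun c => PySem.Str.len c) with hL
    have hLne : L ≠ [] := by simp [hL]
    cases hs : PySem.List.sorted L (fun x => x) false with
    | nil => exact absurd ((PySem.List.sorted_eq_nil_iff L (fun x => x) false).mp hs) hLne
    | cons x t =>
      simp only [if_neg hLne]
      have hperm : (x :: t).Perm L := hs ▸ PySem.List.sorted_perm L (fun x => x) false
      -- sum
      have hsum : L.foldl (· + ·) 0 = (x :: t).sum := by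
        rw [hperm.sum_eq, List.sum_eq_foldl]
      -- min
      obtain ⟨m, hm⟩ : ∃ m, PySem.List.min? L (fun x => x) = some m := by
        cases hmo : PySem.List.min? L (fun x => x) with
        | none => exact absurd ((PySem.List.min?_eq_none_iff L (fun x => x)).mp hmo) hLne
        | some m => exact ⟨m, rfl⟩
      have hmin : m = x := by
        have h1 : m ≤ x := PySem.List.min?_isMin hm x (hperm.mem_iff.mp (by simp))
        have h2 : x ≤ m := PySem.List.key_head_sorted_le L (fun x => x) hs m (PySem.List.min?_mem hm)
        omega
      -- max
      obtain ⟨M, hM⟩ : ∃ M, PySem.List.max? L (fun x => x) = some M := by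
        cases hMo : PySem.List.max? L (fun x => x) with
        | none => exact absurd ((PySem.List.max?_eq_none_iff L (fun x => x)).mp hMo) hLne
        | some M => exact ⟨M, rfl⟩
      have hmax : M = (x :: t).getLast (by simp) := by
        have h1 : (x :: t).getLast (by simp) ≤ M :=
          PySem.List.max?_isMax hM _ (hperm.mem_iff.mp (List.getLast_mem (by simp)))
        have h2 : M ≤ (x :: t).getLast (by simp) :=
          pv_getLast_sorted_ge L x t hs M (PySem.List.max?_mem hM)
        omega
      simp [hm, hM, hmin, hmax, hsum]
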